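-- pv_equiv track=rewrite | github.com/minjung03/COSPRO_Python | COS PRO 모의고사 2/ex07.py | solution
-- ===== SOURCE A (Python) =====
-- def solution(s):
--     answer = []
--     for c in s:
--         if '0' <= c <= '9':
--             n = ord('i') - ord(c)  # 더했을 때 'i'가 되는 코드이니, 더 큰 'i'의 아스키 코드에서 빼야한다
--             c = chr(n)
--         answer.append(c)
--     return ''.join(answer)
-- ===== SOURCE B (Python) =====
-- def solution(s):
--     # Aggregate each maximal digit run into a single integer v of width k,
--     # complement it numerically as 10**k - 1 - v, and re-emit its k digits.
--     parts = []
--     i = 0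
--     n = len(s)
--     while i < n:
--         c = s[i]
--         if '0' <= c <= '9':
--             v = ord(c) - 48
--             j = i + 1
--             while j < n and '0' <= s[j] <= '9':
--                 v = v * 10 + (ord(s[j]) - 48)
--                 j += 1
--             k = j - i
--             m = 10 ** k - 1 - v
--             buf = []
--             for _ in range(k):
--                 buf.append(chr(48 + m % 10))
--                 m //= 10
--             buf.reverse()
--             parts.append(''.join(buf))
--             i = j
--         else:
--             parts.append(c)
--             i += 1
--     return ''.join(parts)
-- ===== Notes on version B (the rewrite author's own statement) =====
-- stated objective: alternative
-- what changed: Instead of mapping each character independently, B segments the string into maximal digit runs, parses each run into one integer v of width k, complements it numerically as 10^k-1-v, and re-emits its k digits by divmod; non-digit characters are copied per segment.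
import Mathlib
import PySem

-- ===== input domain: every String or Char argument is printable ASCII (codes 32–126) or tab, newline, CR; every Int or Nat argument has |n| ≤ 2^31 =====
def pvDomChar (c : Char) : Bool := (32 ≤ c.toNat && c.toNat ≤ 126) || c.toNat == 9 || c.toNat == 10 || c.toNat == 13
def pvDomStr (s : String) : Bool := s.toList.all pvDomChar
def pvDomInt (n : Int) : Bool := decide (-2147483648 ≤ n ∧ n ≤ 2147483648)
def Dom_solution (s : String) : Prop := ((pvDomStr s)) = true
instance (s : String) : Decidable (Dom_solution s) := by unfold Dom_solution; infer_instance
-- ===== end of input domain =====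

-- B replaces A's per-character loop by run segmentation: each maximal digit run of width k is
-- parsed into one integer v, complemented numerically as 10^k-1-v, and its k digits re-emitted
-- (alternative algorithm; no speed claim).

-- ===== PORT A =====
-- answer = []; for c in s: if '0' <= c <= '9': c = chr(ord('i') - ord(c)); answer.append(c); return ''.join(answer)
def solution (s : String) : String :=
  String.mk (s.toList.foldl
    (fun (answer : List Char) (c : Char) =>
      let c := if '0' ≤ c ∧ c ≤ '9' then Char.ofNat (105 - c.toNat) else c
      answer ++ [c])
    [])

-- ===== PORT B =====
-- '0' <= c <= '9'
def pvIsDigit (c : Char) : Bool := decide ('0' ≤ c ∧ c ≤ '9')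

-- inner while: while j < n and '0' <= s[j] <= '9': v = v*10 + (ord(s[j]) - 48); j += 1
-- returns (v, k, rest of the string after the run)
def pvScanRun : List Char → Nat → Nat → Nat × Nat × List Char
  | [], v, k => (v, k, [])
  | c :: t, v, k =>
      if pvIsDigit c then pvScanRun t (v * 10 + (c.toNat - 48)) (k + 1) else (v, k, c :: t)

-- for _ in range(k): buf.append(chr(48 + m % 10)); m //= 10  -- then buf.reverse()
-- (appending then reversing once = building with a prepend accumulator)
def pvEmit : Nat → Nat → List Char → List Char
  | 0, _, acc => acc
  | k + 1, m, acc => pvEmit k (m / 10) (Char.ofNat (48 + m % 10) :: acc)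

lemma pvScanRun_len : ∀ (l : List Char) (v k : Nat), (pvScanRun l v k).2.2.length ≤ l.length := by
  intro l
  induction l with
  | nil => intro v k; simp [pvScanRun]
  | cons c t ih =>
      intro v k
      by_cases h : pvIsDigit c = true
      · simp only [pvScanRun, h, if_true]
        exact le_trans (ih _ _) (Nat.le_succ _)
      · simp [pvScanRun, h]

-- outer while over the character list
def pvLoop : List Char → List Char
  | [] => []
  | c :: t =>
      if pvIsDigit c then
        let r := pvScanRun t (c.toNat - 48) 1
        pvEmit r.2.1 (10 ^ r.2.1 - 1 - r.1) [] ++ pvLoop r.2.2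
      else c :: pvLoop t
  termination_by l => l.length
  decreasing_by
  · exact Nat.lt_succ_of_le (pvScanRun_len t _ _)
  · simp

def solution_alt (s : String) : String := String.mk (pvLoop s.toList)

-- ===== PRECONDITION & SPEC =====
def Spec_solution (s : String) (out : String) : Prop := out = solution_alt s
instance (s : String) (out : String) : Decidable (Spec_solution s out) := by unfold Spec_solution; infer_instance

-- ===== CLAIM (what is proved, stated in full; the proofs are below) =====
def Claim_equal_solution : Prop := ∀ (s : String), Dom_solution s → Spec_solution s (solution s)

-- ===== LEMMAS AND PROOFS =====

-- A's per-character transformation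
def pvGA (c : Char) : Char := if '0' ≤ c ∧ c ≤ '9' then Char.ofNat (105 - c.toNat) else c

lemma foldl_append_map (g : Char → Char) :
    ∀ (l acc : List Char),
      l.foldl (fun answer c => answer ++ [g c]) acc = acc ++ l.map g := by
  intro l
  induction l with
  | nil => intro acc; simp
  | cons c t ih => intro acc; simp [List.foldl, ih]

lemma pvIsDigit_iff (c : Char) : pvIsDigit c = true ↔ ('0' ≤ c ∧ c ≤ '9') := by
  simp [pvIsDigit]

lemma pvDigit_bounds {c : Char} (h : pvIsDigit c = true) : 48 ≤ c.toNat ∧ c.toNat ≤ 57 := by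
  obtain ⟨h1, h2⟩ := (pvIsDigit_iff c).mp h
  exact ⟨UInt32.le_iff_toNat_le.mp (Char.le_def.mp h1),
         UInt32.le_iff_toNat_le.mp (Char.le_def.mp h2)⟩

def pvVal (ds : List Char) (v : Nat) : Nat :=
  ds.foldl (fun a c => a * 10 + (c.toNat - 48)) v

lemma pvScanRun_spec : ∀ (l : List Char) (v k : Nat),
    pvScanRun l v k =
      (pvVal (l.takeWhile pvIsDigit) v, k + (l.takeWhile pvIsDigit).length,
       l.dropWhile pvIsDigit) := by
  intro l
  induction l with
  | nil => intro v k; simp [pvScanRun, pvVal]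
  | cons c t ih =>
      intro v k
      by_cases h : pvIsDigit c = true
      · simp only [pvScanRun, h, if_true, List.takeWhile_cons_of_pos h,
          List.dropWhile_cons_of_pos h, ih, pvVal, List.foldl_cons, List.length_cons]
        simp only [Prod.mk.injEq]
        exact ⟨trivial, by omega, trivial⟩
      · simp [pvScanRun, h, List.takeWhile_cons_of_neg, List.dropWhile_cons_of_neg, pvVal]

lemma pvVal_lt : ∀ (ds : List Char) (v : Nat), (∀ c ∈ ds, pvIsDigit c = true) →
    pvVal ds v < (v + 1) * 10 ^ ds.length := by
  intro ds
  induction ds with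
  | nil => intro v _; simp [pvVal]
  | cons c t ih =>
      intro v hall
      have hc := pvDigit_bounds (hall c (List.mem_cons_self))
      have ht := ih (v * 10 + (c.toNat - 48)) (fun d hd => hall d (List.mem_cons_of_mem _ hd))
      have hstep : v * 10 + (c.toNat - 48) + 1 ≤ (v + 1) * 10 := by omega
      have : (v * 10 + (c.toNat - 48) + 1) * 10 ^ t.length ≤ (v + 1) * 10 ^ (t.length + 1) := by
        calc (v * 10 + (c.toNat - 48) + 1) * 10 ^ t.length
            ≤ ((v + 1) * 10) * 10 ^ t.length := Nat.mul_le_mul_right _ hstep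
          _ = (v + 1) * 10 ^ (t.length + 1) := by rw [pow_succ]; ring
      calc pvVal (c :: t) v = pvVal t (v * 10 + (c.toNat - 48)) := by simp [pvVal]
        _ < (v * 10 + (c.toNat - 48) + 1) * 10 ^ t.length := ht
        _ ≤ (v + 1) * 10 ^ (t.length + 1) := this
        _ = (v + 1) * 10 ^ (c :: t).length := by simp

lemma pvEmit_spec : ∀ (ds : List Char), (∀ c ∈ ds, pvIsDigit c = true) →
    ∀ acc, pvEmit ds.length (10 ^ ds.length - 1 - pvVal ds 0) acc =
      ds.map pvGA ++ acc := by
  intro ds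
  induction ds using List.reverseRecOn with
  | nil => intro _ acc; simp [pvEmit]
  | append_singleton ds' d ih =>
      intro hall acc
      have hd : pvIsDigit d = true := hall d (by simp)
      have hdb := pvDigit_bounds hd
      have hall' : ∀ c ∈ ds', pvIsDigit c = true := fun c hc => hall c (by simp [hc])
      have hval0 : pvVal (ds' ++ [d]) 0 = pvVal ds' 0 * 10 + (d.toNat - 48) := by
        simp [pvVal, List.foldl_append]
      have hv : pvVal ds' 0 < 10 ^ ds'.length := by
        have := pvVal_lt ds' 0 hall'
        simpa using this
      set v := pvVal ds' 0 with hvdef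
      set e := d.toNat - 48 with hedef
      set P := 10 ^ ds'.length with hPdef
      have hval : pvVal (ds' ++ [d]) 0 = v * 10 + e := hval0
      have hlen : (ds' ++ [d]).length = ds'.length + 1 := by simp
      have hP1 : 1 ≤ P := Nat.one_le_pow _ _ (by norm_num)
      have he9 : e ≤ 9 := by omega
      have hm : 10 ^ (ds' ++ [d]).length - 1 - pvVal (ds' ++ [d]) 0
          = 10 * (P - 1 - v) + (9 - e) := by
        rw [hlen, hval, pow_succ, ← hPdef]
        omega
      have hmod : (10 * (P - 1 - v) + (9 - e)) % 10 = 9 - e := by omega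
      have hdiv : (10 * (P - 1 - v) + (9 - e)) / 10 = P - 1 - v := by omega
      rw [hm, hlen]
      show pvEmit (ds'.length + 1) (10 * (P - 1 - v) + (9 - e)) acc = _
      rw [pvEmit, hmod, hdiv]
      have hchar : Char.ofNat (48 + (9 - e)) = pvGA d := by
        have hdig := (pvIsDigit_iff d).mp hd
        simp only [pvGA, if_pos hdig]
        congr 1
        omega
      rw [hchar, ih hall' (pvGA d :: acc)]
      simp

lemma pvLoop_eq_map : ∀ (n : Nat) (l : List Char), l.length ≤ n → pvLoop l = l.map pvGA := by
  intro n
  induction n with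
  | zero =>
      intro l hl
      have : l = [] := List.eq_nil_of_length_eq_zero (Nat.le_zero.mp hl)
      subst this; simp [pvLoop]
  | succ n ih =>
      intro l hl
      match l with
      | [] => simp [pvLoop]
      | c :: t =>
        by_cases h : pvIsDigit c = true
        · rw [pvLoop, if_pos h, pvScanRun_spec]
          set tw := t.takeWhile pvIsDigit with htw
          set dw := t.dropWhile pvIsDigit with hdw
          have hcb := pvDigit_bounds h
          have hrun : ∀ x ∈ c :: tw, pvIsDigit x = true := by
            intro x hx
            rcases List.mem_cons.mp hx with rfl | hx
            · exact h
            · exact List.mem_takeWhile_imp hx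
          have hval : pvVal tw (c.toNat - 48) = pvVal (c :: tw) 0 := by
            simp [pvVal]
          have hlen : 1 + tw.length = (c :: tw).length := by simp; omega
          have hdwlen : dw.length ≤ t.length := by
            rw [hdw]; exact List.length_dropWhile_le _ _
          have hemit := pvEmit_spec (c :: tw) hrun []
          simp only [hval, hlen, hemit, List.append_nil]
          have hsplit : (c :: t).map pvGA = (c :: tw).map pvGA ++ dw.map pvGA := by
            rw [← List.map_append]
            congr 1
            simp [htw, hdw]
          rw [hsplit, ih dw (by simp at hl; omega)]
        · rw [pvLoop, if_neg h]
          have hg : pvGA c = c := by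
            simp only [pvGA, if_neg (fun hc => h ((pvIsDigit_iff c).mpr hc))]
          rw [ih t (by simpa using hl)]
          simp [hg]

-- ===== VERDICT (by name: the statement is the Claim_ definition above) =====
theorem solution_spec : Claim_equal_solution := by
  intro s _
  unfold Spec_solution solution solution_alt
  show String.mk (s.toList.foldl (fun answer c => answer ++ [pvGA c]) []) = _
  rw [foldl_append_map pvGA, pvLoop_eq_map s.toList.length s.toList (le_refl _)]
  simp
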